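-- pv_equiv track=rewrite | github.com/cassiamanoel/InterviewAI | backend/app/services/rag_service.py | _is_portuguese
-- ===== SOURCE A (Python) =====
-- def _is_portuguese(text: str) -> bool:
--     """Heurística PT: resolve frases curtas e sem acento."""
--     pt_keywords = [
--         "você", "vc", "seu", "sua", "cor", "hobby", "hobbies",
--         "trabalho", "experiência", "experiencia", "forte", "fraco",
--         "fala", "sobre", "empresa", "gosta", "faz", "atualmente",
--         "cargo", "salário", "salario", "pontos", "fortes", "fracos",
--         "qual", "quais", "como", "onde", "quando", "porque", "porquê",
--         "meu", "minha", "nosso", "nossa", "dele", "dela",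
--         "projeto", "equipe", "time", "líder", "lider",
--         "favorita", "favorito", "prefere", "preferido",
--         "maior", "melhor", "pior", "dificuldade",
--         "conte", "descreva", "explique", "poderia",
--         "já", "nunca", "sempre", "também", "tambem"
--     ]
--     text = text.lower()
--     return any(word in text for word in pt_keywords)
-- ===== SOURCE B (Python) =====
-- # Same keyword set, stored as one '|'-joined string and split once; then one
-- # anchored left-to-right pass over the lowered text using a first-character
-- # bucket index, instead of A's independent full substring scan per keyword.
-- _KW = ("você|vc|seu|sua|cor|hobby|hobbies|"
--        "trabalho|experiência|experiencia|forte|fraco|"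
--        "fala|sobre|empresa|gosta|faz|atualmente|"
--        "cargo|salário|salario|pontos|fortes|fracos|"
--        "qual|quais|como|onde|quando|porque|porquê|"
--        "meu|minha|nosso|nossa|dele|dela|"
--        "projeto|equipe|time|líder|lider|"
--        "favorita|favorito|prefere|preferido|"
--        "maior|melhor|pior|dificuldade|"
--        "conte|descreva|explique|poderia|"
--        "já|nunca|sempre|também|tambem").split("|")
--
-- _BY_FIRST = {}
-- for _w in _KW:
--     _BY_FIRST.setdefault(_w[0], []).append(_w)
--
--
-- def _is_portuguese(text: str) -> bool:
--     t = text.lower()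
--     for i in range(len(t)):
--         for w in _BY_FIRST.get(t[i], []):
--             if t.startswith(w, i):
--                 return True
--     return False
-- ===== Notes on version B (the rewrite author's own statement) =====
-- stated objective: alternative
-- what changed: Instead of one independent substring search over the whole text per keyword, B keeps the same keywords as a single delimiter-joined string split once at module load, indexes them by first character, and makes one left-to-right pass over the lowered text testing only the matching bucket as anchored prefixes at each position.
import Mathlib
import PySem

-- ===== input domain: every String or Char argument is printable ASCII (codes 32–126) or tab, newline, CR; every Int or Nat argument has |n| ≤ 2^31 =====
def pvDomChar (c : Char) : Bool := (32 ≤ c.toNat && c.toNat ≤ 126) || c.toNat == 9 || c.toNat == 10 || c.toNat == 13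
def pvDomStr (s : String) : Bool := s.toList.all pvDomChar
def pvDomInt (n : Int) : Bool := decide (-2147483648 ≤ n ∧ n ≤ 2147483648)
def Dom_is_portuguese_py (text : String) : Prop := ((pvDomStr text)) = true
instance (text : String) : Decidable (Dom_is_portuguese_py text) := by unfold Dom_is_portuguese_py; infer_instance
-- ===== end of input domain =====

-- B keeps the same keywords as one '|'-joined string split once, indexes them by
-- first character and scans the lowered text in a single anchored pass, instead of
-- A's one full substring search per keyword (objective: alternative structure).

-- ===== PORT A =====
-- the pt_keywords list literal of A
def ptKeywords : List String := [
  "você", "vc", "seu", "sua", "cor", "hobby", "hobbies",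
  "trabalho", "experiência", "experiencia", "forte", "fraco",
  "fala", "sobre", "empresa", "gosta", "faz", "atualmente",
  "cargo", "salário", "salario", "pontos", "fortes", "fracos",
  "qual", "quais", "como", "onde", "quando", "porque", "porquê",
  "meu", "minha", "nosso", "nossa", "dele", "dela",
  "projeto", "equipe", "time", "líder", "lider",
  "favorita", "favorito", "prefere", "preferido",
  "maior", "melhor", "pior", "dificuldade",
  "conte", "descreva", "explique", "poderia",
  "já", "nunca", "sempre", "também", "tambem"]

-- any(word in text for word in pt_keywords), after text = text.lower()
def is_portuguese_py (text : String) : Bool :=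
  let t := PySem.Str.lower text
  ptKeywords.any (fun word => PySem.Str.isIn word t)

-- ===== PORT B =====
-- _KW of Source B: one '|'-joined string, split("|") once
def pvKwJoined : String :=
  "você|vc|seu|sua|cor|hobby|hobbies|trabalho|experiência|experiencia|forte|fraco|fala|sobre|empresa|gosta|faz|atualmente|cargo|salário|salario|pontos|fortes|fracos|qual|quais|como|onde|quando|porque|porquê|meu|minha|nosso|nossa|dele|dela|projeto|equipe|time|líder|lider|favorita|favorito|prefere|preferido|maior|melhor|pior|dificuldade|conte|descreva|explique|poderia|já|nunca|sempre|também|tambem"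

def pvKw : List String := (PySem.Str.split? pvKwJoined "|").getD []

-- w[0] of a keyword (every keyword of pvKw is nonempty)
def pvKeyChar (w : String) : Char :=
  match w.toList with
  | [] => ' '
  | c :: _ => c

-- _BY_FIRST: the module-level grouping loop of Source B
-- (setdefault(w[0], []).append(w)  ==  d[w[0]] = d.get(w[0], []) + [w])
def pvByFirst : PySem.Dict Char (List String) :=
  pvKw.foldl (fun d w => d.modify (pvKeyChar w) [] (· ++ [w])) PySem.Dict.empty

-- the position loop of Source B, as structural recursion on the suffix at position i:
-- only the bucket of keywords whose first character is t[i] is tested, anchored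
def pvScan (t : List Char) : Bool :=
  match t with
  | [] => false
  | c :: rest =>
      ((pvByFirst.getD c []).any (fun w => PySem.Chars.startswith (c :: rest) w.toList))
        || pvScan rest

def is_portuguese_py_alt (text : String) : Bool :=
  pvScan (PySem.Str.lower text).toList

-- ===== PRECONDITION & SPEC =====
def Spec_is_portuguese_py (text : String) (out : Bool) : Prop := out = is_portuguese_py_alt text
instance (text : String) (out : Bool) : Decidable (Spec_is_portuguese_py text out) := by unfold Spec_is_portuguese_py; infer_instance

-- ===== CLAIM (what is proved, stated in full; the proofs are below) =====
def Claim_equal_is_portuguese_py : Prop := ∀ (text : String), Dom_is_portuguese_py text → Spec_is_portuguese_py text (is_portuguese_py text)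

-- ===== LEMMAS AND PROOFS =====

-- splitting the joined literal recovers exactly A's keyword list
set_option maxRecDepth 4000 in
theorem pvKw_eq : pvKw = ptKeywords := by decide

-- the bucket for c holds exactly the keywords whose first character is c, in order
theorem pvByFirst_getD (c : Char) :
    pvByFirst.getD c [] = ptKeywords.filter (fun w => pvKeyChar w == c) := by
  have h : pvByFirst
      = (ptKeywords.map (fun w => (pvKeyChar w, w))).foldl
          (fun d p => d.modify p.1 [] (· ++ [p.2])) PySem.Dict.empty := by
    rw [List.foldl_map]
    unfold pvByFirst
    rw [pvKw_eq]
  rw [h, PySem.Dict.getD_foldl_modify_append, PySem.Dict.getD_empty]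
  simp [List.filter_map, Function.comp_def]

theorem keywords_ne_nil : ∀ w ∈ ptKeywords, w.toList ≠ [] := by decide

-- one pass with the first-character index finds exactly the substring matches
theorem pvScan_eq_any (t : List Char) :
    pvScan t = ptKeywords.any (fun w => PySem.Chars.isIn w.toList t) := by
  induction t with
  | nil =>
    have h : ∀ w ∈ ptKeywords, PySem.Chars.isIn w.toList ([] : List Char) = false := by
      intro w hw
      rw [PySem.Chars.isIn_eq_false_iff]
      exact fun hinf => keywords_ne_nil w hw (List.eq_nil_of_infix_nil hinf)
    simp only [pvScan]
    symm
    rw [List.any_eq_false]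
    intro w hw
    simp [h w hw]
  | cons c rest ih =>
    simp only [pvScan, ih]
    cases hA : (ptKeywords.any fun w => PySem.Chars.isIn w.toList (c :: rest)) with
    | false =>
      -- no keyword is a substring of c :: rest
      rw [List.any_eq_false] at hA
      have hbucket : (pvByFirst.getD c []).any
          (fun w => PySem.Chars.startswith (c :: rest) w.toList) = false := by
        rw [List.any_eq_false]
        intro w hw hsw
        have hwK := List.mem_of_mem_filter ((pvByFirst_getD c) ▸ hw)
        rw [PySem.Chars.startswith_iff] at hsw
        exact hA w hwK (by rw [PySem.Chars.isIn_iff_infix]; exact hsw.isInfix)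
      have hrest : (ptKeywords.any fun w => PySem.Chars.isIn w.toList rest) = false := by
        rw [List.any_eq_false]
        intro w hwK hin
        rw [PySem.Chars.isIn_iff_infix] at hin
        exact hA w hwK (by
          rw [PySem.Chars.isIn_iff_infix]
          exact List.infix_cons_iff.mpr (Or.inr hin))
      rw [hbucket, hrest]
      rfl
    | true =>
      -- some keyword is a substring of c :: rest
      rw [List.any_eq_true] at hA
      obtain ⟨w, hwK, hwin⟩ := hA
      rw [PySem.Chars.isIn_iff_infix, List.infix_cons_iff] at hwin
      rcases hwin with hpre | hinf
      · -- anchored match at this position: the bucket test fires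
        have hw0 : pvKeyChar w = c := by
          obtain ⟨c0, ws, hws⟩ : ∃ c0 ws, w.toList = c0 :: ws := by
            cases hwl : w.toList with
            | nil => exact absurd hwl (keywords_ne_nil w hwK)
            | cons a l => exact ⟨a, l, rfl⟩
          rw [hws, List.cons_prefix_cons] at hpre
          simp [pvKeyChar, hws, hpre.1]
        have hmem : w ∈ pvByFirst.getD c [] := by
          rw [pvByFirst_getD, List.mem_filter]
          exact ⟨hwK, by simp [hw0]⟩
        have hb : (pvByFirst.getD c []).any
            (fun w => PySem.Chars.startswith (c :: rest) w.toList) = true := by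
          rw [List.any_eq_true]
          exact ⟨w, hmem, by rw [PySem.Chars.startswith_iff]; exact hpre⟩
        rw [hb, Bool.true_or]
      · -- match strictly inside the tail: the recursive scan finds it
        have hr : (ptKeywords.any fun w => PySem.Chars.isIn w.toList rest) = true := by
          rw [List.any_eq_true]
          exact ⟨w, hwK, by rw [PySem.Chars.isIn_iff_infix]; exact hinf⟩
        rw [hr, Bool.or_true]

-- ===== VERDICT (by name: the statement is the Claim_ definition above) =====
theorem is_portuguese_py_spec : Claim_equal_is_portuguese_py := by
  intro text _
  unfold Spec_is_portuguese_py is_portuguese_py is_portuguese_py_alt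
  rw [pvScan_eq_any]
  simp [PySem.Str.isIn]
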